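-- pv_equiv track=rewrite | github.com/sondhg/agv-fullstack | agv_server/schedule_generate/services/algorithm1.py | _calculate_shared_points
-- ===== SOURCE A (Python) =====
-- from typing import List, Dict, Any
--
-- def _calculate_shared_points(current_path: list, other_paths: List[List]) -> list:
--     """
--     Calculate the shared points (CP^i) for a path based on Definition 3.
--     For an active AGV r_i, CP^i consists of an ordered sequence of points shared with other AGVs:
--     CP^i = {v_x : v_x ∈ Π_i, v_x ∈ Π_j, j ≠ i}
--
--     Args:
--         current_path (list): The path to calculate shared points for (Π_i)
--         other_paths (List[List]): List of other residual paths to compare against (Π_j, j ≠ i)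
--
--     Returns:
--         list: List of shared points in order of appearance in current_path
--     """
--     # Initialize shared points list to store the results
--     shared_points = []
--
--     # Create a set of all points in all other paths for faster lookups
--     all_other_path_points = set()
--     for path in other_paths:
--         # Add all points from this path to our set
--         all_other_path_points.update(path)
--
--     # Check each point in current path
--     for point in current_path:
--         # If the point exists in any other path, add it to shared_points
--         if point in all_other_path_points:
--             shared_points.append(point)
--
--     return shared_points  # Return points in the original order from current_path
-- ===== SOURCE B (Python) =====
-- def _calculate_shared_points(current_path: list, other_paths) -> list:
--     # Inverted strategy: index current_path by value -> positions, then sweep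
--     # the other paths marking positions, and finally read off marked positions.
--     positions = {}
--     for i, point in enumerate(current_path):
--         positions.setdefault(point, []).append(i)
--     marked = [False] * len(current_path)
--     for path in other_paths:
--         for point in path:
--             for i in positions.pop(point, ()):
--                 marked[i] = True
--     return [point for i, point in enumerate(current_path) if marked[i]]
-- ===== Notes on version B (the rewrite author's own statement) =====
-- stated objective: alternative
-- what changed: Instead of building a set of all other-path points and filtering current_path by membership, B builds a value-to-positions index of current_path, sweeps the other paths popping each value's entry and marking its positions, and emits the marked positions in order.
import Mathlib
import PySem

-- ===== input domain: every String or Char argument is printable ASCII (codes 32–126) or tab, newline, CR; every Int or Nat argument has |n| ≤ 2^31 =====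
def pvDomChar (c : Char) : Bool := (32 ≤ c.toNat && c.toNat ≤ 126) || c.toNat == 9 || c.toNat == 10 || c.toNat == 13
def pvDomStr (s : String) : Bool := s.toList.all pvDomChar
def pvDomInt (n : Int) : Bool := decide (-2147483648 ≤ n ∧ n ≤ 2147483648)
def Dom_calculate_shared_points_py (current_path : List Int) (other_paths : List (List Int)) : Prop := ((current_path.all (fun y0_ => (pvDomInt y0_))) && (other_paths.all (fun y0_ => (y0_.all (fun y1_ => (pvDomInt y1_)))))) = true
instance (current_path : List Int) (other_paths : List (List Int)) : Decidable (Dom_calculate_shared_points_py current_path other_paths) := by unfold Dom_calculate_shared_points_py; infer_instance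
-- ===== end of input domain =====

-- ===== PORT A =====
-- B replaces A's "union set of all other-path points, then filter" with an inverted
-- strategy: index current_path by value → positions, mark positions hit by the
-- other paths' points, then read off the marked positions in order (alternative).
def calculate_shared_points_py (current_path : List Int) (other_paths : List (List Int)) : List Int :=
  let all_other_path_points : PySem.Set Int :=
    other_paths.foldl (fun s path => PySem.Set.update s path) PySem.Set.empty
  current_path.foldl
    (fun shared_points point =>
      if PySem.Set.contains all_other_path_points point then shared_points ++ [point]
      else shared_points) []

-- ===== PORT B =====
def calculate_shared_points_py_alt (current_path : List Int) (other_paths : List (List Int)) : List Int :=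
  let positions : PySem.Dict Int (List Int) :=
    (PySem.List.enumerate current_path).foldl
      (fun d ip => d.modify ip.2 [] (· ++ [ip.1])) PySem.Dict.empty
  let marked : List Bool := List.replicate current_path.length false
  -- positions.pop(point, ()) = read the entry (default empty) and erase the key
  let st : PySem.Dict Int (List Int) × List Bool := other_paths.foldl
    (fun st path => path.foldl
      (fun st point =>
        (st.1.erase point, (st.1.getD point []).foldl
          (fun m i => PySem.List.pySetD m i true) st.2)) st) (positions, marked)
  ((PySem.List.enumerate current_path).filter
      (fun ip => PySem.List.pyGetD st.2 ip.1 false)).map (·.2)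

-- ===== PRECONDITION & SPEC =====
def Spec_calculate_shared_points_py (current_path : List Int) (other_paths : List (List Int)) (out : List Int) : Prop := out = calculate_shared_points_py_alt current_path other_paths
instance (current_path : List Int) (other_paths : List (List Int)) (out : List Int) : Decidable (Spec_calculate_shared_points_py current_path other_paths out) := by unfold Spec_calculate_shared_points_py; infer_instance

-- ===== CLAIM (what is proved, stated in full; the proofs are below) =====
def Claim_equal_calculate_shared_points_py : Prop := ∀ (current_path : List Int) (other_paths : List (List Int)), Dom_calculate_shared_points_py current_path other_paths → Spec_calculate_shared_points_py current_path other_paths (calculate_shared_points_py current_path other_paths)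

-- ===== LEMMAS AND PROOFS =====

-- A side: membership in the accumulated set = membership in some other path
lemma mem_foldl_update (other_paths : List (List Int)) (s : PySem.Set Int) (x : Int) :
    x ∈ other_paths.foldl (fun s path => PySem.Set.update s path) s ↔
      x ∈ s ∨ ∃ p ∈ other_paths, x ∈ p := by
  induction other_paths generalizing s with
  | nil => simp
  | cons h t ih => simp [ih, PySem.Set.mem_update]; tauto

-- A side: the append-accumulator loop is a filter
lemma foldl_append_filter (l : List Int) (acc : List Int) (f : Int → Bool) :
    l.foldl (fun r p => if f p then r ++ [p] else r) acc = acc ++ l.filter f := by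
  induction l generalizing acc with
  | nil => simp
  | cons h t ih =>
    by_cases hf : f h <;> simp [List.foldl, hf, ih]

-- B side: characterisation of the positions index
lemma getD_positions (cp : List Int) (c : Int) :
    ((PySem.List.enumerate cp).foldl
      (fun d ip => d.modify ip.2 [] (· ++ [ip.1])) PySem.Dict.empty).getD c [] =
    ((PySem.List.enumerate cp).filter (fun ip => ip.2 == c)).map (·.1) := by
  have h : (PySem.List.enumerate cp).foldl
      (fun d ip => d.modify ip.2 [] (· ++ [ip.1])) PySem.Dict.empty
      = ((PySem.List.enumerate cp).map (fun ip => (ip.2, ip.1))).foldl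
          (fun d p => d.modify p.1 [] (· ++ [p.2])) PySem.Dict.empty := by
    rw [List.foldl_map]
  rw [h, PySem.Dict.getD_foldl_modify_append]
  simp [PySem.Dict.getD_empty, List.filter_map, List.map_map, Function.comp_def]

lemma mem_positions (cp : List Int) (c : Int) (j : Int) :
    (j ∈ ((PySem.List.enumerate cp).foldl
        (fun d ip => d.modify ip.2 [] (· ++ [ip.1])) PySem.Dict.empty).getD c []) ↔
    ∃ (k : Nat) (h : k < cp.length), cp[k] = c ∧ j = (k : Int) := by
  rw [getD_positions]
  simp only [List.mem_map, List.mem_filter, PySem.List.mem_enumerate_iff]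
  constructor
  · rintro ⟨ip, ⟨⟨k, hk, rfl⟩, hc⟩, rfl⟩
    simp only [beq_iff_eq] at hc
    exact ⟨k, hk, hc, by simp⟩
  · rintro ⟨k, hk, hc, rfl⟩
    exact ⟨((k : Int), cp[k]), ⟨⟨k, hk, by simp⟩, by simp [hc]⟩, rfl⟩

-- B side: innermost marking loop, pointwise
lemma foldl_pySetD_getElem? (L : List Int) (m : List Bool) (j : Nat)
    (hL : ∀ i ∈ L, ∃ k : Nat, i = (k : Int)) :
    (L.foldl (fun m i => PySem.List.pySetD m i true) m)[j]? =
      if (j : Int) ∈ L then m[j]?.map (fun _ => true) else m[j]? := by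
  induction L generalizing m with
  | nil => simp
  | cons i L ih =>
    obtain ⟨k, rfl⟩ := hL i (List.mem_cons_self ..)
    have hL' : ∀ i ∈ L, ∃ k : Nat, i = (k : Int) := fun i hi => hL i (List.mem_cons_of_mem _ hi)
    simp only [List.foldl_cons, PySem.List.pySetD_natCast, ih _ hL']
    by_cases hjk : j = k
    · subst hjk
      have hset : (m.set j true)[j]? = m[j]?.map (fun _ => true) := by
        simp only [List.getElem?_set_self']
        cases m[j]? <;> rfl
      by_cases hmem : (j : Int) ∈ L
      · rw [if_pos hmem, if_pos (List.mem_cons_self ..), hset]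
        cases m[j]? <;> rfl
      · rw [if_neg hmem, if_pos (List.mem_cons_self ..), hset]
    · have : ((j : Int) = (k : Int)) ↔ False := by simpa using hjk
      by_cases hmem : (j : Int) ∈ L <;>
        simp [hmem, this, Ne.symm hjk]

-- B side: getD after erase
lemma getD_erase (d : PySem.Dict Int (List Int)) (k k' : Int) (d0 : List Int) :
    (d.erase k).getD k' d0 = if k' = k then d0 else d.getD k' d0 := by
  obtain ⟨items⟩ := d
  simp only [PySem.Dict.erase, PySem.Dict.getD, PySem.Dict.get?]
  induction items with
  | nil => simp
  | cons p t ih =>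
    by_cases hpk : p.1 = k <;> by_cases hpk' : p.1 = k' <;> by_cases hkk : k' = k <;>
      simp_all

-- B side: one path of the pop-and-mark loop (dict shape and marks, pointwise)
lemma mark_pop_path (path : List Int) (pos : PySem.Dict Int (List Int)) (m : List Bool) (j : Nat)
    (hpos : ∀ p, ∀ i ∈ pos.getD p [], ∃ k : Nat, i = (k : Int)) :
    (∀ q, ((path.foldl (fun st point =>
        (st.1.erase point, (st.1.getD point []).foldl
          (fun m i => PySem.List.pySetD m i true) st.2)) (pos, m)).1).getD q [] =
        if q ∈ path then [] else pos.getD q []) ∧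
    ((path.foldl (fun st point =>
        (st.1.erase point, (st.1.getD point []).foldl
          (fun m i => PySem.List.pySetD m i true) st.2)) (pos, m)).2)[j]? =
      (if ∃ p ∈ path, (j : Int) ∈ pos.getD p [] then m[j]?.map (fun _ => true) else m[j]?) := by
  induction path generalizing pos m with
  | nil => simp
  | cons p path ih =>
    have hm1 : ((pos.getD p []).foldl (fun m i => PySem.List.pySetD m i true) m)[j]? =
        if (j : Int) ∈ pos.getD p [] then m[j]?.map (fun _ => true) else m[j]? :=
      foldl_pySetD_getElem? _ _ _ (hpos p)
    have hpos' : ∀ q, ∀ i ∈ (pos.erase p).getD q [], ∃ k : Nat, i = (k : Int) := by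
      intro q i hi
      rw [getD_erase] at hi
      by_cases hq : q = p
      · simp [hq] at hi
      · exact hpos q i (by simpa [hq] using hi)
    obtain ⟨ih1, ih2⟩ := ih (pos.erase p)
      ((pos.getD p []).foldl (fun m i => PySem.List.pySetD m i true) m) hpos'
    constructor
    · intro q
      simp only [List.foldl_cons, ih1, getD_erase]
      by_cases h1 : q ∈ path <;> by_cases h2 : q = p <;> simp [h1, h2]
    · by_cases h1 : (j : Int) ∈ pos.getD p []
      · have hcond : ∃ p' ∈ p :: path, (j : Int) ∈ pos.getD p' [] := ⟨p, by simp, h1⟩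
        have hm1' : ((pos.getD p []).foldl (fun m i => PySem.List.pySetD m i true) m)[j]? =
            m[j]?.map (fun _ => true) := by rw [hm1, if_pos h1]
        simp only [List.foldl_cons, ih2, hm1', if_pos hcond]
        by_cases h2 : ∃ q ∈ path, (j : Int) ∈ (pos.erase p).getD q []
        · rw [if_pos h2]
          cases m[j]? <;> rfl
        · rw [if_neg h2]
      · have hm1' : ((pos.getD p []).foldl (fun m i => PySem.List.pySetD m i true) m)[j]? =
            m[j]? := by rw [hm1, if_neg h1]
        have hsame : (∃ q ∈ path, (j : Int) ∈ (pos.erase p).getD q []) ↔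
            (∃ p' ∈ p :: path, (j : Int) ∈ pos.getD p' []) := by
          constructor
          · rintro ⟨q, hq, hi⟩
            rw [getD_erase] at hi
            by_cases hqp : q = p
            · simp [hqp] at hi
            · exact ⟨q, List.mem_cons_of_mem _ hq, by simpa [hqp] using hi⟩
          · rintro ⟨q, hq, hi⟩
            rcases List.mem_cons.mp hq with rfl | hq'
            · exact absurd hi h1
            · have hqp : q ≠ p := fun h => h1 (h ▸ hi)
              refine ⟨q, hq', ?_⟩
              rw [getD_erase, if_neg hqp]
              exact hi
        simp only [List.foldl_cons, ih2, hm1', hsame]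

-- B side: the full pop-and-mark nest over all other paths, pointwise
lemma mark_pop_ops (ops : List (List Int)) (pos : PySem.Dict Int (List Int)) (m : List Bool) (j : Nat)
    (hpos : ∀ p, ∀ i ∈ pos.getD p [], ∃ k : Nat, i = (k : Int)) :
    (∀ q, ((ops.foldl (fun st path => path.foldl (fun st point =>
        (st.1.erase point, (st.1.getD point []).foldl
          (fun m i => PySem.List.pySetD m i true) st.2)) st) (pos, m)).1).getD q [] =
        if ∃ path ∈ ops, q ∈ path then [] else pos.getD q []) ∧
    ((ops.foldl (fun st path => path.foldl (fun st point =>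
        (st.1.erase point, (st.1.getD point []).foldl
          (fun m i => PySem.List.pySetD m i true) st.2)) st) (pos, m)).2)[j]? =
      (if ∃ path ∈ ops, ∃ p ∈ path, (j : Int) ∈ pos.getD p [] then m[j]?.map (fun _ => true)
       else m[j]?) := by
  induction ops generalizing pos m with
  | nil => simp
  | cons path ops ih =>
    obtain ⟨hp1, hp2⟩ := mark_pop_path path pos m j hpos
    have hpos' : ∀ q, ∀ i ∈ ((path.foldl (fun st point =>
        (st.1.erase point, (st.1.getD point []).foldl
          (fun m i => PySem.List.pySetD m i true) st.2)) (pos, m)).1).getD q [],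
        ∃ k : Nat, i = (k : Int) := by
      intro q i hi
      rw [hp1] at hi
      by_cases hq : q ∈ path
      · simp [hq] at hi
      · exact hpos q i (by simpa [hq] using hi)
    obtain ⟨ih1, ih2⟩ := ih _ _ hpos'
    constructor
    · intro q
      rw [List.foldl_cons, ih1]
      simp only [hp1]
      by_cases h1 : ∃ p ∈ ops, q ∈ p <;> by_cases h2 : q ∈ path <;>
        simp [h1, h2]
    · rw [List.foldl_cons, ih2]
      simp only [hp1]
      by_cases h1 : ∃ p ∈ path, (j : Int) ∈ pos.getD p []
      · have hcond : ∃ pa ∈ path :: ops, ∃ p ∈ pa, (j : Int) ∈ pos.getD p [] :=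
          ⟨path, by simp, h1⟩
        have hp2' : ((path.foldl (fun st point =>
            (st.1.erase point, (st.1.getD point []).foldl
              (fun m i => PySem.List.pySetD m i true) st.2)) (pos, m)).2)[j]? =
            m[j]?.map (fun _ => true) := by rw [hp2, if_pos h1]
        rw [hp2', if_pos hcond]
        by_cases h2 : ∃ pa ∈ ops, ∃ p ∈ pa, (j : Int) ∈
            (if p ∈ path then ([] : List Int) else pos.getD p [])
        · rw [if_pos h2]
          cases m[j]? <;> rfl
        · rw [if_neg h2]
      · have hp2' : ((path.foldl (fun st point =>
            (st.1.erase point, (st.1.getD point []).foldl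
              (fun m i => PySem.List.pySetD m i true) st.2)) (pos, m)).2)[j]? =
            m[j]? := by rw [hp2, if_neg h1]
        have hsame : (∃ pa ∈ ops, ∃ p ∈ pa, (j : Int) ∈
            (if p ∈ path then ([] : List Int) else pos.getD p [])) ↔
            (∃ pa ∈ path :: ops, ∃ p ∈ pa, (j : Int) ∈ pos.getD p []) := by
          constructor
          · rintro ⟨pa, hpa, p, hp, hi⟩
            by_cases hmem : p ∈ path
            · simp [hmem] at hi
            · exact ⟨pa, List.mem_cons_of_mem _ hpa, p, hp, by simpa [hmem] using hi⟩
          · rintro ⟨pa, hpa, p, hp, hi⟩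
            rcases List.mem_cons.mp hpa with rfl | hpa'
            · exact absurd ⟨p, hp, hi⟩ h1
            · have hmem : p ∉ path := fun hmem => h1 ⟨p, hmem, hi⟩
              exact ⟨pa, hpa', p, hp, by simp [hmem, hi]⟩
        simp only [hp2', hsame]

-- B side: reading off a filtered enumerate is a plain filter
lemma filter_enumerate_eq_filter (cp : List Int) (s : Int) (f : Int → Bool) (g : Int → Bool)
    (h : ∀ (k : Nat) (hk : k < cp.length), f (s + (k : Int)) = g cp[k]) :
    ((PySem.List.enumerate cp s).filter (fun ip => f ip.1)).map (·.2) = cp.filter g := by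
  induction cp generalizing s with
  | nil => simp [PySem.List.enumerate_nil]
  | cons x xs ih =>
    have h0 : f s = g x := by simpa using h 0 (by simp)
    have h' : ∀ (k : Nat) (hk : k < xs.length), f (s + 1 + (k : Int)) = g xs[k] := by
      intro k hk
      have := h (k + 1) (by simpa using Nat.succ_lt_succ hk)
      simpa [add_comm, add_left_comm, add_assoc] using this
    rw [PySem.List.enumerate_cons]
    by_cases hx : g x <;> simp [h0, hx, ih (s + 1) h']

-- ===== VERDICT (by name: the statement is the Claim_ definition above) =====
theorem calculate_shared_points_py_spec : Claim_equal_calculate_shared_points_py := by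
  intro cp ops _
  unfold Spec_calculate_shared_points_py calculate_shared_points_py calculate_shared_points_py_alt
  simp only []
  rw [foldl_append_filter]
  set pos := (PySem.List.enumerate cp).foldl
      (fun d ip => d.modify ip.2 [] (· ++ [ip.1])) PySem.Dict.empty with hposdef
  have hpos : ∀ p, ∀ i ∈ pos.getD p [], ∃ k : Nat, i = (k : Int) := by
    intro p i hi
    rw [mem_positions] at hi
    obtain ⟨k, _, _, rfl⟩ := hi
    exact ⟨k, rfl⟩
  rw [filter_enumerate_eq_filter cp 0
      (fun i => PySem.List.pyGetD
        ((ops.foldl (fun st path => path.foldl (fun st point =>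
            (st.1.erase point, (st.1.getD point []).foldl
              (fun m i => PySem.List.pySetD m i true) st.2)) st)
          (pos, List.replicate cp.length false)).2) i false)
      (fun p => PySem.Set.contains
        (ops.foldl (fun s path => PySem.Set.update s path) PySem.Set.empty) p)]
  simp only [List.nil_append]
  intro k hk
  rw [zero_add, PySem.List.pyGetD_natCast, List.getD_eq_getElem?_getD,
      (mark_pop_ops ops pos (List.replicate cp.length false) k hpos).2]
  have hrep : (List.replicate cp.length false)[k]? = some false := by
    simp [hk]
  have hiff : (∃ path ∈ ops, ∃ p ∈ path, (k : Int) ∈ pos.getD p []) ↔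
      (∃ path ∈ ops, cp[k] ∈ path) := by
    constructor
    · rintro ⟨path, hpa, p, hp, hi⟩
      rw [mem_positions] at hi
      obtain ⟨k', hk', hc, hkk⟩ := hi
      have : k' = k := by exact_mod_cast hkk.symm
      subst this
      exact ⟨path, hpa, hc ▸ hp⟩
    · rintro ⟨path, hpa, hp⟩
      exact ⟨path, hpa, cp[k], hp, (mem_positions cp cp[k] k).mpr ⟨k, hk, rfl, rfl⟩⟩
  rw [Bool.eq_iff_iff]
  simp only [PySem.Set.contains]
  by_cases hc : ∃ path ∈ ops, cp[k] ∈ path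
  · simp [hiff, hc, hrep, mem_foldl_update, PySem.Set.empty]
  · simp [hiff, hc, hrep, mem_foldl_update, PySem.Set.empty]
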